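-- pv_equiv track=rewrite | github.com/dojinyou/TIL | python/quiz_and_test/quiz_answer.py | quiz5
-- ===== SOURCE A (Python) =====
-- def quiz5(limit, num, weights):
-- 	weights.reverse()
-- 	sum_weight = 0
-- 	count = 0
-- 	while len(weights) != 0:
-- 		if sum_weight + weights[-1] > limit:
-- 			break
-- 		sum_weight += weights.pop()
-- 		count += 1
-- 	return count
-- ===== SOURCE B (Python) =====
-- from itertools import accumulate, takewhile
--
-- def quiz5(limit, num, weights):
--     count = sum(1 for _ in takewhile(lambda s: s <= limit, accumulate(weights)))
--     # reproduce A's in-place mutation: reversed list with the taken (last count) elements removed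
--     weights.reverse()
--     del weights[len(weights) - count:]
--     return count
-- ===== Notes on version B (the rewrite author's own statement) =====
-- stated objective: idiomatic
-- what changed: Replaces the explicit reverse-and-pop while loop with itertools accumulate+takewhile counting prefix sums within limit, then performs the list mutation in one reverse+del step.
import Mathlib
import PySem

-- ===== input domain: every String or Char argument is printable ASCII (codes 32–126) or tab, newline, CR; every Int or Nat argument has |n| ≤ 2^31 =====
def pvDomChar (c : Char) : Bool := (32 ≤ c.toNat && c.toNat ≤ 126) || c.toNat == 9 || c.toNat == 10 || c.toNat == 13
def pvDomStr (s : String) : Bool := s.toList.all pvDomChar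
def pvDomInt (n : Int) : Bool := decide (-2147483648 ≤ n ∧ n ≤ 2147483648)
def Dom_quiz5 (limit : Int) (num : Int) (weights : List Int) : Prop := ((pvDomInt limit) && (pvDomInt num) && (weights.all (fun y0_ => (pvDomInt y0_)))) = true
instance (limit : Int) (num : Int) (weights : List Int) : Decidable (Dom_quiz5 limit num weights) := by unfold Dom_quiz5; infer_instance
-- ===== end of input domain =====

-- ===== PORT A =====
-- while loop of A: weights reversed, then repeatedly inspect weights[-1], pop and count.
-- A also mutates `weights` in place; this equivalence is about the RETURN value only.
def quiz5Loop (limit : Int) (ws : List Int) (sumWeight : Int) (count : Int) : Int :=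
  match h : ws.getLast? with
  | none => count
  | some x =>
      if sumWeight + x > limit then count
      else quiz5Loop limit ws.dropLast (sumWeight + x) (count + 1)
termination_by ws.length
decreasing_by
  have : ws ≠ [] := by intro hnil; simp [hnil] at h
  simpa [List.length_dropLast] using Nat.sub_lt (List.length_pos_of_ne_nil this) one_pos

def quiz5 (limit : Int) (num : Int) (weights : List Int) : Int :=
  quiz5Loop limit weights.reverse 0 0

-- ===== PORT B =====
-- takewhile (≤ limit) over accumulate weights, counted; the mutation of `weights`
-- does not affect the return value and has no Lean counterpart.
def quiz5AltCount (limit : Int) (ws : List Int) (s : Int) : Int :=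
  match ws with
  | [] => 0
  | x :: t => if s + x ≤ limit then 1 + quiz5AltCount limit t (s + x) else 0

def quiz5_alt (limit : Int) (num : Int) (weights : List Int) : Int :=
  quiz5AltCount limit weights 0

-- ===== PRECONDITION & SPEC =====
def Spec_quiz5 (limit : Int) (num : Int) (weights : List Int) (out : Int) : Prop := out = quiz5_alt limit num weights
instance (limit : Int) (num : Int) (weights : List Int) (out : Int) : Decidable (Spec_quiz5 limit num weights out) := by unfold Spec_quiz5; infer_instance

-- ===== CLAIM (what is proved, stated in full; the proofs are below) =====
def Claim_equal_quiz5 : Prop := ∀ (limit : Int) (num : Int) (weights : List Int), Dom_quiz5 limit num weights → Spec_quiz5 limit num weights (quiz5 limit num weights)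

-- ===== LEMMAS AND PROOFS =====
theorem quiz5Loop_reverse (limit : Int) (ws : List Int) :
    ∀ (s c : Int), quiz5Loop limit ws.reverse s c = c + quiz5AltCount limit ws s := by
  induction ws with
  | nil => intro s c; simp [quiz5Loop, quiz5AltCount]
  | cons x t ih =>
      intro s c
      rw [List.reverse_cons, quiz5Loop]
      split
      · next heq => simp at heq
      · next y heq =>
          have hy : x = y := by simpa [List.getLast?_concat] using heq
          subst hy
          rw [List.dropLast_concat, quiz5AltCount]
          split_ifs with h1 h2 h2
          · omega
          · omega
          · rw [ih]; ring
          · omega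

-- ===== VERDICT (by name: the statement is the Claim_ definition above) =====
theorem quiz5_spec : Claim_equal_quiz5 := by
  intro limit num weights _
  unfold Spec_quiz5 quiz5 quiz5_alt
  simpa using quiz5Loop_reverse limit weights 0 0
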